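-- pv_equiv track=rewrite | github.com/kh277/BOJ | 백준/Gold/1409. 점 칠하기/점 칠하기.py | solve
-- ===== SOURCE A (Python) =====
-- import math
-- from collections import deque
--
-- dx = [-1, 1]
--
-- def BFS(N, setP, visited, start, theta):
--     result = 0
--     q = deque()
--     q.append(start)
--     visited.add(start)
--
--     while q:
--         curV = q.popleft()
--
--         for i in range(2):
--             nextV = curV + theta*dx[i]
--             if nextV < 0:
--                 nextV += 360
--             elif nextV >= 360:
--                 nextV -= 360
--
--             if nextV in setP and nextV not in visited:
--                 q.append(nextV)
--                 visited.add(nextV)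
--                 result += 1
--
--     return result
--
-- def solve(N, point):
--     if N == 1:
--         return 0
--
--     # 두 점 사이의 간격 전부 구하기
--     result = 0
--     point.sort()
--     gap = []
--     for i in range(N-1):
--         for j in range(i+1, N):
--             gap.append(point[j]-point[i])
--
--     # 회전각이 theta일 때, 이어질 수 있는 간선의 총 개수를 구하기
--     setP = set(point)
--     for theta in gap:
--         visited = set()
--         curRes = 0
--         for i in range(N):
--             if point[i] not in visited:
--                 curRes += math.ceil(BFS(N, setP, visited, point[i], theta)/2) * 2
--
--         result = max(result, curRes)
--
--     return result
-- ===== SOURCE B (Python) =====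
-- from collections import Counter
--
--
-- def solve(N, point):
--     if N == 1:
--         return 0
--
--     point.sort()
--     best = 0
--     for i in range(N - 1):
--         for j in range(i + 1, N):
--             theta = point[j] - point[i]
--             # component labelling by merge-on-relabel: each point starts as its
--             # own label; a single forward edge p -> (p+theta)%360 merges classes
--             label = {p: p for p in point}
--             for p in label:
--                 q = (p + theta) % 360
--                 if q in label and label[p] != label[q]:
--                     old, new = label[p], label[q]
--                     for x in label:
--                         if label[x] == old:
--                             label[x] = new
--             # tally each component once: size//2*2 edges can be realised in it
--             cnt = Counter(label.values())
--             cur = 0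
--             seen = set()
--             for k in range(N):
--                 L = label[point[k]]
--                 if L not in seen:
--                     seen.add(L)
--                     cur += cnt[L] // 2 * 2
--             best = max(best, cur)
--     return best
-- ===== Notes on version B (the rewrite author's own statement) =====
-- stated objective: alternative
-- what changed: Replaces the per-start deque BFS over +-theta neighbours by a union-find-style component labelling: a label map over the points merged by relabelling along single-direction edges p -> (p+theta)%360, with component sizes then tallied from a Counter of the labels; it trades the BFS traversal for O(n) relabel merges per edge.
-- outside the precondition, e.g. on solve(4, [120, 459, 402, 840]): A returns 0, B returns 2; on solve(5, [604, 878, 538, 158, 178]): A returns 2, B returns 4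
import Mathlib
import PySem

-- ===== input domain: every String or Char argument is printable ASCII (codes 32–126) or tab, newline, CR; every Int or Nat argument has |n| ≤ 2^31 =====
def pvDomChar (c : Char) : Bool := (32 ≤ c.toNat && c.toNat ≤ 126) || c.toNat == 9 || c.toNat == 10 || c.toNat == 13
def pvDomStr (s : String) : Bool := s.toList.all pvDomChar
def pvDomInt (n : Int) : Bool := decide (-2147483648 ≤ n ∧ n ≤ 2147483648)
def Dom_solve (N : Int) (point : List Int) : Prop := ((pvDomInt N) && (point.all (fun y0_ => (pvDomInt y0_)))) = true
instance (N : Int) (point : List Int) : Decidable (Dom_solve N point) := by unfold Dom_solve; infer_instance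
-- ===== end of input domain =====

-- B replaces A's per-start deque BFS by a union-find-style component labelling:
-- a label map over the points is merged by relabelling along the single-direction
-- edges p -> (p+theta)%360, and component sizes are then tallied from a Counter of
-- the labels. Both A and B sort `point` in place; the equivalence proved is about
-- the return value.

-- ===== PORT A =====

-- if nextV < 0: nextV += 360 ; elif nextV >= 360: nextV -= 360
def bfsWrap (x : Int) : Int := if x < 0 then x + 360 else if 360 ≤ x then x - 360 else x

-- body of 'for i in range(2)' with dx = [-1, 1]; state = (queue, visited, result)
def bfsStep (setP : PySem.Set Int) (theta curV : Int)
    (st : List Int × PySem.Set Int × Int) (d : Int) : List Int × PySem.Set Int × Int :=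
  let nextV := bfsWrap (curV + theta * d)
  if nextV ∈ setP ∧ ¬ (nextV ∈ st.2.1) then
    (st.1 ++ [nextV], PySem.Set.add st.2.1 nextV, st.2.2 + 1)
  else st

-- 'while q:' — fuel only makes the recursion total; solve passes enough fuel
def bfsLoop (setP : PySem.Set Int) (theta : Int) :
    Nat → List Int → PySem.Set Int → Int → Int × PySem.Set Int
  | _, [], visited, result => (result, visited)
  | 0, _ :: _, visited, result => (result, visited)
  | fuel + 1, curV :: qs, visited, result =>
      let st := [(-1 : Int), 1].foldl (bfsStep setP theta curV) (qs, visited, result)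
      bfsLoop setP theta fuel st.1 st.2.1 st.2.2

-- BFS(N, setP, visited, start, theta); visited is mutated in Python, returned here
def BFS (N : Int) (setP : PySem.Set Int) (visited : PySem.Set Int) (start theta : Int)
    (fuel : Nat) : Int × PySem.Set Int :=
  bfsLoop setP theta fuel [start] (PySem.Set.add visited start) 0

-- body of 'for i in range(N)': state = (visited, curRes)
def stepA (N : Int) (setP : PySem.Set Int) (pt : List Int) (theta : Int)
    (st : PySem.Set Int × Int) (i : Int) : PySem.Set Int × Int :=
  let p := PySem.List.pyGetD pt i 0
  if ¬ (p ∈ st.1) then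
    let r := BFS N setP st.1 p theta (pt.length + 1)
    -- math.ceil(r/2) * 2 for an int r (exact: the float r/2 is exact for |r| ≤ 2^52)
    (r.2, st.2 + PySem.Int.floordiv (r.1 + 1) 2 * 2)
  else st

def solve (N : Int) (point : List Int) : Int :=
  if N == 1 then 0 else
  let pt := PySem.List.sorted point (fun x => x) false
  let gap := (PySem.List.pyRange 0 (N - 1) 1).foldl (fun g i =>
      (PySem.List.pyRange (i + 1) N 1).foldl (fun g j =>
          g ++ [PySem.List.pyGetD pt j 0 - PySem.List.pyGetD pt i 0]) g) []
  let setP := PySem.Set.ofList pt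
  gap.foldl (fun result theta =>
    let st := (PySem.List.pyRange 0 N 1).foldl (stepA N setP pt theta) (PySem.Set.empty, 0)
    max result st.2) 0

-- ===== PORT B =====

-- body of 'for x in label: if label[x] == old: label[x] = new'
def relabelStep (old new : Int) (d : PySem.Dict Int Int) (x : Int) : PySem.Dict Int Int :=
  if d.getD x 0 == old then d.insert x new else d

-- body of 'for p in label: q = (p+theta)%360; if q in label and label[p] != label[q]: relabel'
def mergeStep (theta : Int) (keys : List Int) (d : PySem.Dict Int Int) (p : Int) :
    PySem.Dict Int Int :=
  let q := PySem.Int.mod (p + theta) 360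
  if d.contains q = true ∧ ¬ d.getD p 0 = d.getD q 0 then
    keys.foldl (relabelStep (d.getD p 0) (d.getD q 0)) d
  else d

-- label = {p: p for p in point}, then the merge loop over its keys
def buildLabel (theta : Int) (pt : List Int) : PySem.Dict Int Int :=
  let lab0 := pt.foldl (fun d p => d.insert p p) PySem.Dict.empty
  lab0.keys.foldl (mergeStep theta lab0.keys) lab0

-- body of 'for k in range(N)': state = (seen, cur)
def tallyStep (lab cnt : PySem.Dict Int Int) (pt : List Int)
    (st : PySem.Set Int × Int) (k : Int) : PySem.Set Int × Int :=
  let L := lab.getD (PySem.List.pyGetD pt k 0) 0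
  if L ∈ st.1 then st
  else (PySem.Set.add st.1 L, st.2 + PySem.Int.floordiv (cnt.getD L 0) 2 * 2)

def solve_alt (N : Int) (point : List Int) : Int :=
  if N == 1 then 0 else
  let pt := PySem.List.sorted point (fun x => x) false
  (PySem.List.pyRange 0 (N - 1) 1).foldl (fun best i =>
    (PySem.List.pyRange (i + 1) N 1).foldl (fun best j =>
      let theta := PySem.List.pyGetD pt j 0 - PySem.List.pyGetD pt i 0
      let lab := buildLabel theta pt
      let cnt := PySem.Dict.counter lab.values
      let st := (PySem.List.pyRange 0 N 1).foldl (tallyStep lab cnt pt) (PySem.Set.empty, 0)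
      max best st.2) best) 0

-- ===== PRECONDITION & SPEC =====
-- Pre_ restricts to the problem's natural domain: N is the number of points (A raises
-- IndexError when N > len(point)) and, when N ≥ 2, every point is a position on the
-- 360-circle; for points outside [0, 360) A's single-step wrap produces accidental
-- graphs (see the excluded-input cites in the claim).
def Pre_solve (N : Int) (point : List Int) : Prop :=
  N ≤ (point.length : Int) ∧ (N ≤ 1 ∨ ∀ p ∈ point, 0 ≤ p ∧ p < 360)
instance (N : Int) (point : List Int) : Decidable (Pre_solve N point) := by
  unfold Pre_solve; infer_instance

def pvWitness_solve : Int × List Int := (4, [10, 0, 200, 190])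

def Spec_solve (N : Int) (point : List Int) (out : Int) : Prop := out = solve_alt N point
instance (N : Int) (point : List Int) (out : Int) : Decidable (Spec_solve N point out) := by
  unfold Spec_solve; infer_instance

-- ===== CLAIM (what is proved, stated in full; the proofs are below) =====
def Claim_equal_solve : Prop := ∀ (N : Int) (point : List Int),
  Dom_solve N point → Pre_solve N point → Spec_solve N point (solve N point)

-- ===== LEMMAS AND PROOFS =====

-- the step function on circle positions: s θ x = (x + θ) % 360
def sfun (θ x : Int) : Int := PySem.Int.mod (x + θ) 360

-- every element of l is a circle position
def RangeOK (l : List Int) : Prop := ∀ x ∈ l, 0 ≤ x ∧ x < 360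

-- the edges merged so far: one forward edge from every processed point
def edgeRel (pts : List Int) (θ : Int) (done : List Int) (x y : Int) : Prop :=
  x ∈ done ∧ y ∈ pts ∧ y = sfun θ x

lemma mod360 (x : Int) : PySem.Int.mod x 360 = x % 360 :=
  PySem.Int.mod_eq_emod_of_pos (by norm_num)

lemma sfun_inv (θ x : Int) (h0 : 0 ≤ x) (h1 : x < 360) : sfun (-θ) (sfun θ x) = x := by
  unfold sfun
  rw [mod360, mod360, Int.emod_add_emod]
  have : x + θ + -θ = x := by ring
  rw [this, Int.emod_eq_of_lt h0 h1]

lemma sfun_inv' (θ x : Int) (h0 : 0 ≤ x) (h1 : x < 360) : sfun θ (sfun (-θ) x) = x := by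
  have := sfun_inv (-θ) x h0 h1
  rwa [neg_neg] at this

lemma bfsWrap_pos (θ x : Int) (hx0 : 0 ≤ x) (hx1 : x < 360) (ht0 : 0 ≤ θ) (ht1 : θ < 360) :
    bfsWrap (x + θ * 1) = sfun θ x := by
  unfold bfsWrap sfun
  rw [mod360, mul_one]
  split_ifs with h1 h2
  · omega
  · have : x + θ = (x + θ - 360) + 360 := by ring
    rw [this, Int.add_emod_right, Int.emod_eq_of_lt (by omega) (by omega)]
    omega
  · rw [Int.emod_eq_of_lt (by omega) (by omega)]

lemma bfsWrap_neg (θ x : Int) (hx0 : 0 ≤ x) (hx1 : x < 360) (ht0 : 0 ≤ θ) (ht1 : θ < 360) :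
    bfsWrap (x + θ * (-1)) = sfun (-θ) x := by
  unfold bfsWrap sfun
  have e : x + θ * (-1) = x + -θ := by ring
  rw [e, mod360]
  split_ifs with h1 h2
  · have : x + -θ = (x + -θ + 360) - 360 := by ring
    rw [show x + -θ = (x + -θ + 360) + -360 by ring, ← Int.sub_eq_add_neg, Int.sub_emod_right,
      Int.emod_eq_of_lt (by omega) (by omega)]
    omega
  · omega
  · rw [Int.emod_eq_of_lt (by omega) (by omega)]

lemma filter_sub_append (K vis adds : List Int) (hKnd : K.Nodup) (hand : adds.Nodup)
    (hsub : ∀ x ∈ adds, x ∈ K) (hdis : ∀ x ∈ adds, x ∉ vis) :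
    (K.filter (fun z => decide (z ∉ vis))).length
      = (K.filter (fun z => decide (z ∉ vis ++ adds))).length + adds.length := by
  have hperm : List.Perm (K.filter (fun z => decide (z ∉ vis)))
      (K.filter (fun z => decide (z ∉ vis ++ adds)) ++ adds) := by
    rw [List.perm_ext_iff_of_nodup (List.Nodup.filter _ hKnd)]
    · intro a
      simp only [List.mem_filter, List.mem_append, decide_eq_true_eq, not_or]
      constructor
      · rintro ⟨haK, hav⟩
        by_cases ha : a ∈ adds
        · exact Or.inr ha
        · exact Or.inl ⟨haK, hav, ha⟩
      · rintro (⟨haK, hav, _⟩ | ha)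
        · exact ⟨haK, hav⟩
        · exact ⟨hsub a ha, hdis a ha⟩
    · rw [List.nodup_append]
      refine ⟨List.Nodup.filter _ hKnd, hand, ?_⟩
      intro a ha b hb
      simp only [List.mem_filter, List.mem_append, decide_eq_true_eq, not_or] at ha
      intro h
      exact ha.2.2 (h ▸ hb)
  have := hperm.length_eq
  simp only [List.length_append] at this
  omega

lemma bfsLoop_inv (setP : PySem.Set Int) (θ : Int) (hpr : RangeOK setP)
    (hθ0 : 0 ≤ θ) (hθ1 : θ < 360)
    (K V0 : List Int) (p : Int)
    (hKnd : K.Nodup) (hV0nd : V0.Nodup) (hKsub : ∀ x ∈ K, x ∈ setP)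
    (hKcl : ∀ x ∈ K, (sfun θ x ∈ setP → sfun θ x ∈ K) ∧
      (sfun (-θ) x ∈ setP → sfun (-θ) x ∈ K))
    (hKmin : ∀ vis : List Int, p ∈ vis →
      (∀ x ∈ K, x ∈ vis → (sfun θ x ∈ setP → sfun θ x ∈ vis) ∧
        (sfun (-θ) x ∈ setP → sfun (-θ) x ∈ vis)) →
      ∀ x ∈ K, x ∈ vis)
    (hdisj : ∀ x ∈ K, x ∉ V0) (hpK : p ∈ K) :
    ∀ (fuel : Nat) (q : List Int) (vis : PySem.Set Int) (res : Int),
    q.Nodup → (∀ x ∈ q, x ∈ vis ∧ x ∈ K) →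
    vis.Nodup → (∀ x ∈ vis, x ∈ V0 ∨ x ∈ K) → (∀ x ∈ V0, x ∈ vis) →
    p ∈ vis →
    (∀ x ∈ vis, x ∉ V0 → x ∉ q →
      (sfun θ x ∈ setP → sfun θ x ∈ vis) ∧ (sfun (-θ) x ∈ setP → sfun (-θ) x ∈ vis)) →
    res = (vis.length : Int) - V0.length - 1 →
    q.length + (K.filter (fun z => decide (z ∉ vis))).length < fuel →
    (bfsLoop setP θ fuel q vis res).1 = (K.length : Int) - 1 ∧
    (∀ x, x ∈ (bfsLoop setP θ fuel q vis res).2 ↔ x ∈ V0 ∨ x ∈ K) ∧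
    (bfsLoop setP θ fuel q vis res).2.Nodup := by
  intro fuel
  induction fuel with
  | zero => intro q vis res _ _ _ _ _ _ _ _ hf; exact absurd hf (by omega)
  | succ fuel ih =>
    intro q vis res hqnd hqsub hvnd hvmem hV0v hpvis hcl hres hfuel
    cases q with
    | nil =>
      have hKvis : ∀ x ∈ K, x ∈ vis := by
        apply hKmin vis hpvis
        intro x hxK hxvis
        exact hcl x hxvis (hdisj x hxK) (List.not_mem_nil)
      have hmem : ∀ x, x ∈ vis ↔ x ∈ V0 ∨ x ∈ K := by
        intro x
        constructor
        · exact hvmem x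
        · rintro (h | h)
          · exact hV0v x h
          · exact hKvis x h
      have hVKnd : (V0 ++ K).Nodup := by
        rw [List.nodup_append]
        refine ⟨hV0nd, hKnd, ?_⟩
        intro a ha b hb
        intro h
        exact hdisj b hb (h ▸ ha)
      have hperm : List.Perm vis (V0 ++ K) := by
        rw [List.perm_ext_iff_of_nodup hvnd hVKnd]
        intro a
        rw [hmem a, List.mem_append]
      have hlen : vis.length = V0.length + K.length := by
        have := hperm.length_eq
        simpa using this
      refine ⟨?_, hmem, hvnd⟩
      show res = (K.length : Int) - 1
      rw [hres, hlen]
      push_cast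
      ring
    | cons curV qs =>
      have hcurV : curV ∈ vis ∧ curV ∈ K := hqsub curV (List.mem_cons_self)
      have hcurS : curV ∈ setP := hKsub curV hcurV.2
      have hcurR : 0 ≤ curV ∧ curV < 360 := hpr curV hcurS
      have hn1 : bfsWrap (curV + θ * (-1)) = sfun (-θ) curV :=
        bfsWrap_neg θ curV hcurR.1 hcurR.2 hθ0 hθ1
      have hn2 : bfsWrap (curV + θ * 1) = sfun θ curV :=
        bfsWrap_pos θ curV hcurR.1 hcurR.2 hθ0 hθ1
      set n1 := sfun (-θ) curV with hn1d
      set n2 := sfun θ curV with hn2d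
      have hn1K : n1 ∈ setP → n1 ∈ K := (hKcl curV hcurV.2).2
      have hn2K : n2 ∈ setP → n2 ∈ K := (hKcl curV hcurV.2).1
      have hloop : bfsLoop setP θ (fuel + 1) (curV :: qs) vis res
          = (fun st => bfsLoop setP θ fuel st.1 st.2.1 st.2.2)
            ([(-1 : Int), 1].foldl (bfsStep setP θ curV) (qs, vis, res)) := rfl
      suffices H : ∀ adds : List Int,
          (∀ x ∈ adds, x ∈ K ∧ x ∉ vis) → adds.Nodup →
          (n1 ∈ setP → n1 ∈ vis ++ adds) → (n2 ∈ setP → n2 ∈ vis ++ adds) →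
          [(-1 : Int), 1].foldl (bfsStep setP θ curV) (qs, vis, res)
            = (qs ++ adds, vis ++ adds, res + adds.length) →
          (bfsLoop setP θ (fuel + 1) (curV :: qs) vis res).1 = (K.length : Int) - 1 ∧
          (∀ x, x ∈ (bfsLoop setP θ (fuel + 1) (curV :: qs) vis res).2 ↔ x ∈ V0 ∨ x ∈ K) ∧
          (bfsLoop setP θ (fuel + 1) (curV :: qs) vis res).2.Nodup by
        by_cases hc1 : n1 ∈ setP ∧ ¬ n1 ∈ vis
        · have hadd1 : PySem.Set.add vis n1 = vis ++ [n1] := PySem.Set.add_of_not_mem hc1.2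
          by_cases hc2 : n2 ∈ setP ∧ ¬ n2 ∈ vis ++ [n1]
          · have hadd2 : PySem.Set.add (vis ++ [n1]) n2 = (vis ++ [n1]) ++ [n2] :=
              PySem.Set.add_of_not_mem hc2.2
            apply H [n1, n2]
            · intro x hx
              rcases List.mem_cons.mp hx with h | hx
              · subst h
                exact ⟨hn1K hc1.1, hc1.2⟩
              · rw [List.mem_singleton] at hx
                subst hx
                refine ⟨hn2K hc2.1, fun h => hc2.2 (List.mem_append.mpr (Or.inl h))⟩
            · refine List.nodup_cons.mpr ⟨?_, List.nodup_singleton _⟩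
              intro h
              rw [List.mem_singleton] at h
              exact hc2.2 (h ▸ List.mem_append.mpr (Or.inr (List.mem_singleton.mpr rfl)))
            · intro _; simp
            · intro _; simp
            · have hstep1 : bfsStep setP θ curV (qs, vis, res) (-1)
                  = (qs ++ [n1], vis ++ [n1], res + 1) := by
                simp only [bfsStep, hn1]
                rw [if_pos hc1, hadd1]
              have hstep2 : bfsStep setP θ curV (qs ++ [n1], vis ++ [n1], res + 1) 1
                  = ((qs ++ [n1]) ++ [n2], (vis ++ [n1]) ++ [n2], res + 1 + 1) := by
                simp only [bfsStep, hn2]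
                rw [if_pos hc2, hadd2]
              simp only [List.foldl, hstep1, hstep2]
              simp [List.append_assoc]
              omega
          · apply H [n1]
            · intro x hx
              rw [List.mem_singleton] at hx
              subst hx
              exact ⟨hn1K hc1.1, hc1.2⟩
            · exact List.nodup_singleton _
            · intro _; simp
            · intro hn2s
              rcases (not_and.mp hc2 hn2s) with h
              have : n2 ∈ vis ++ [n1] := not_not.mp h
              simpa using this
            · have hstep1 : bfsStep setP θ curV (qs, vis, res) (-1)
                  = (qs ++ [n1], vis ++ [n1], res + 1) := by
                simp only [bfsStep, hn1]
                rw [if_pos hc1, hadd1]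
              have hstep2 : bfsStep setP θ curV (qs ++ [n1], vis ++ [n1], res + 1) 1
                  = (qs ++ [n1], vis ++ [n1], res + 1) := by
                simp only [bfsStep, hn2]
                rw [if_neg hc2]
              simp only [List.foldl, hstep1, hstep2]
              simp
        · by_cases hc2 : n2 ∈ setP ∧ ¬ n2 ∈ vis
          · have hadd2 : PySem.Set.add vis n2 = vis ++ [n2] := PySem.Set.add_of_not_mem hc2.2
            apply H [n2]
            · intro x hx
              rw [List.mem_singleton] at hx
              subst hx
              exact ⟨hn2K hc2.1, hc2.2⟩
            · exact List.nodup_singleton _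
            · intro hn1s
              have : n1 ∈ vis := not_not.mp (not_and.mp hc1 hn1s)
              simp [this]
            · intro _; simp
            · have hstep1 : bfsStep setP θ curV (qs, vis, res) (-1) = (qs, vis, res) := by
                simp only [bfsStep, hn1]
                rw [if_neg hc1]
              have hstep2 : bfsStep setP θ curV (qs, vis, res) 1
                  = (qs ++ [n2], vis ++ [n2], res + 1) := by
                simp only [bfsStep, hn2]
                rw [if_pos hc2, hadd2]
              simp only [List.foldl, hstep1, hstep2]
              simp
          · apply H []
            · intro x hx; cases hx
            · exact List.nodup_nil
            · intro hn1s
              have : n1 ∈ vis := not_not.mp (not_and.mp hc1 hn1s)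
              simp [this]
            · intro hn2s
              have : n2 ∈ vis := not_not.mp (not_and.mp hc2 hn2s)
              simp [this]
            · have hstep1 : bfsStep setP θ curV (qs, vis, res) (-1) = (qs, vis, res) := by
                simp only [bfsStep, hn1]
                rw [if_neg hc1]
              have hstep2 : bfsStep setP θ curV (qs, vis, res) 1 = (qs, vis, res) := by
                simp only [bfsStep, hn2]
                rw [if_neg hc2]
              simp only [List.foldl, hstep1, hstep2]
              simp
      intro adds haddsK haddsnd hcl1 hcl2 hst
      rw [hloop, hst]
      simp only
      have haddsvis : ∀ x ∈ adds, x ∉ vis := fun x hx => (haddsK x hx).2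
      apply ih (qs ++ adds) (vis ++ adds) (res + adds.length)
      · rw [List.nodup_append]
        refine ⟨List.Nodup.of_cons hqnd, haddsnd, ?_⟩
        intro a ha b hb h
        exact haddsvis b hb (h ▸ (hqsub a (List.mem_cons_of_mem _ ha)).1)
      · intro x hx
        rcases List.mem_append.mp hx with h | h
        · have := hqsub x (List.mem_cons_of_mem _ h)
          exact ⟨List.mem_append.mpr (Or.inl this.1), this.2⟩
        · exact ⟨List.mem_append.mpr (Or.inr h), (haddsK x h).1⟩
      · rw [List.nodup_append]
        refine ⟨hvnd, haddsnd, ?_⟩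
        intro a ha b hb h
        exact haddsvis b hb (h ▸ ha)
      · intro x hx
        rcases List.mem_append.mp hx with h | h
        · exact hvmem x h
        · exact Or.inr (haddsK x h).1
      · intro x hx
        exact List.mem_append.mpr (Or.inl (hV0v x hx))
      · exact List.mem_append.mpr (Or.inl hpvis)
      · intro x hx hxV0 hxq
        rcases List.mem_append.mp hx with h | h
        · by_cases hxc : x = curV
          · subst hxc
            constructor
            · intro hs
              exact hcl2 hs
            · intro hs
              exact hcl1 hs
          · have hxq' : x ∉ curV :: qs := by
              intro hmem
              rcases List.mem_cons.mp hmem with h | hmem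
              · exact hxc h
              · exact hxq (List.mem_append.mpr (Or.inl hmem))
            have := hcl x h hxV0 hxq'
            exact ⟨fun hs => List.mem_append.mpr (Or.inl (this.1 hs)),
              fun hs => List.mem_append.mpr (Or.inl (this.2 hs))⟩
        · exact absurd (List.mem_append.mpr (Or.inr h)) hxq
      · rw [hres]
        simp only [List.length_append]
        push_cast
        ring
      · have hflt := filter_sub_append K vis adds hKnd haddsnd
          (fun x hx => (haddsK x hx).1) haddsvis
        simp only [List.length_cons, List.length_append] at hfuel ⊢
        omega

-- ===== B-side lemmas: the label map builds the connected components =====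

lemma eqvGen_congr {α : Type} (r s : α → α → Prop) (h : ∀ a b, r a b ↔ s a b) (x y : α) :
    Relation.EqvGen r x y ↔ Relation.EqvGen s x y :=
  ⟨Relation.EqvGen.mono (fun a b hab => (h a b).mp hab),
   Relation.EqvGen.mono (fun a b hab => (h a b).mpr hab)⟩

lemma eqvGen_bot {α : Type} (x y : α) :
    Relation.EqvGen (fun _ _ => False) x y ↔ x = y := by
  constructor
  · intro h
    induction h with
    | rel _ _ hr => exact hr.elim
    | refl => rfl
    | symm a b _ ih => exact ih.symm
    | trans a b c _ _ ih1 ih2 => exact ih1.trans ih2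
  · rintro rfl
    exact Relation.EqvGen.refl x

lemma eqvGen_pair {α : Type} (r : α → α → Prop) (p q x y : α) :
    Relation.EqvGen (fun a b => r a b ∨ (a = p ∧ b = q)) x y ↔
      Relation.EqvGen r x y ∨
      (Relation.EqvGen r x p ∧ Relation.EqvGen r q y) ∨
      (Relation.EqvGen r x q ∧ Relation.EqvGen r p y) := by
  constructor
  · intro h
    induction h with
    | rel a b hr =>
      rcases hr with hr | ⟨ha, hb⟩
      · exact Or.inl (Relation.EqvGen.rel _ _ hr)
      · subst ha; subst hb
        exact Or.inr (Or.inl ⟨Relation.EqvGen.refl _, Relation.EqvGen.refl _⟩)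
    | refl a => exact Or.inl (Relation.EqvGen.refl a)
    | symm a b _ ih =>
      rcases ih with h | ⟨h1, h2⟩ | ⟨h1, h2⟩
      · exact Or.inl (Relation.EqvGen.symm _ _ h)
      · exact Or.inr (Or.inr ⟨Relation.EqvGen.symm _ _ h2, Relation.EqvGen.symm _ _ h1⟩)
      · exact Or.inr (Or.inl ⟨Relation.EqvGen.symm _ _ h2, Relation.EqvGen.symm _ _ h1⟩)
    | trans a b c _ _ ih1 ih2 =>
      rcases ih1 with h1 | ⟨h1a, h1b⟩ | ⟨h1a, h1b⟩ <;>
        rcases ih2 with h2 | ⟨h2a, h2b⟩ | ⟨h2a, h2b⟩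
      · exact Or.inl (Relation.EqvGen.trans _ _ _ h1 h2)
      · exact Or.inr (Or.inl ⟨Relation.EqvGen.trans _ _ _ h1 h2a, h2b⟩)
      · exact Or.inr (Or.inr ⟨Relation.EqvGen.trans _ _ _ h1 h2a, h2b⟩)
      · exact Or.inr (Or.inl ⟨h1a, Relation.EqvGen.trans _ _ _ h1b h2⟩)
      · exact Or.inr (Or.inl ⟨h1a, h2b⟩)
      · exact Or.inl (Relation.EqvGen.trans _ _ _ h1a h2b)
      · exact Or.inr (Or.inr ⟨h1a, Relation.EqvGen.trans _ _ _ h1b h2⟩)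
      · exact Or.inl (Relation.EqvGen.trans _ _ _ h1a h2b)
      · exact Or.inr (Or.inr ⟨h1a, h2b⟩)
  · intro h
    have hbase : ∀ a b, Relation.EqvGen r a b →
        Relation.EqvGen (fun a b => r a b ∨ (a = p ∧ b = q)) a b :=
      fun a b hab => Relation.EqvGen.mono (fun u v huv => Or.inl huv) hab
    have hedge : Relation.EqvGen (fun a b => r a b ∨ (a = p ∧ b = q)) p q :=
      Relation.EqvGen.rel _ _ (Or.inr ⟨rfl, rfl⟩)
    rcases h with h | ⟨h1, h2⟩ | ⟨h1, h2⟩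
    · exact hbase _ _ h
    · exact Relation.EqvGen.trans _ _ _ (Relation.EqvGen.trans _ _ _ (hbase _ _ h1) hedge)
        (hbase _ _ h2)
    · exact Relation.EqvGen.trans _ _ _ (Relation.EqvGen.trans _ _ _ (hbase _ _ h1)
        (Relation.EqvGen.symm _ _ hedge)) (hbase _ _ h2)

-- the initial dict {p: p for p in l}
lemma getD_init (l : List Int) : ∀ (d : PySem.Dict Int Int) (y : Int),
    (l.foldl (fun d p => d.insert p p) d).getD y 0 = if y ∈ l then y else d.getD y 0 := by
  induction l with
  | nil => intro d y; simp
  | cons p rest ih =>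
    intro d y
    rw [List.foldl_cons, ih]
    by_cases hy : y ∈ rest
    · simp [hy]
    · by_cases hyp : y = p
      · subst hyp
        simp [hy, PySem.Dict.getD_insert]
      · simp [hy, hyp, PySem.Dict.getD_insert]

-- the relabel loop: every key with the old label gets the new one
lemma relabel_getD (old new : Int) :
    ∀ (keys : List Int) (d : PySem.Dict Int Int), keys.Nodup → ∀ y,
    (keys.foldl (relabelStep old new) d).getD y 0
      = if y ∈ keys ∧ d.getD y 0 = old then new else d.getD y 0 := by
  intro keys
  induction keys with
  | nil => intro d _ y; simp
  | cons x rest ih =>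
    intro d hnd y
    have hx : x ∉ rest := (List.nodup_cons.mp hnd).1
    have hrest : rest.Nodup := (List.nodup_cons.mp hnd).2
    rw [List.foldl_cons, ih _ hrest]
    have hd1 : ∀ z, z ≠ x → (relabelStep old new d x).getD z 0 = d.getD z 0 := by
      intro z hz
      unfold relabelStep
      split_ifs with h
      · rw [PySem.Dict.getD_insert, if_neg hz]
      · rfl
    have hd1x : (relabelStep old new d x).getD x 0
        = if d.getD x 0 = old then new else d.getD x 0 := by
      unfold relabelStep
      by_cases h : d.getD x 0 = old
      · rw [if_pos (by simpa using h), PySem.Dict.getD_insert, if_pos rfl, if_pos h]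
      · rw [if_neg (by simpa using h), if_neg h]
    by_cases hyx : y = x
    · subst hyx
      rw [if_neg (fun hc => hx hc.1), hd1x]
      by_cases ho : d.getD y 0 = old
      · rw [if_pos ho, if_pos ⟨List.mem_cons_self, ho⟩]
      · rw [if_neg ho, if_neg (fun hc => ho hc.2)]
    · rw [hd1 y hyx]
      by_cases hyr : y ∈ rest
      · by_cases ho : d.getD y 0 = old
        · rw [if_pos ⟨hyr, ho⟩, if_pos ⟨List.mem_cons_of_mem _ hyr, ho⟩]
        · rw [if_neg (fun hc => ho hc.2), if_neg (fun hc => ho hc.2)]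
      · rw [if_neg (fun hc => hyr hc.1),
          if_neg (fun hc => (List.mem_cons.mp hc.1).elim hyx hyr)]

lemma relabel_keys (old new : Int) :
    ∀ (keys : List Int) (d : PySem.Dict Int Int), (∀ x ∈ keys, x ∈ d.keys) →
    (keys.foldl (relabelStep old new) d).keys = d.keys := by
  intro keys
  induction keys with
  | nil => intro d _; rfl
  | cons x rest ih =>
    intro d hsub
    have hx : x ∈ d.keys := hsub x (List.mem_cons_self)
    have hd1 : (relabelStep old new d x).keys = d.keys := by
      unfold relabelStep
      split_ifs with h
      · refine PySem.Dict.keys_insert_of_contains _ _ ?_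
        rw [PySem.Dict.contains_iff_mem_keys]
        exact hx
      · rfl
    rw [List.foldl_cons, ih _ (by intro z hz; rw [hd1]; exact hsub z (List.mem_cons_of_mem _ hz)), hd1]

-- the merge loop maintains: equal labels ↔ connected by the processed edges
lemma merge_inv (θ : Int) (pts : List Int) (hnd : pts.Nodup) :
    ∀ (todo done : List Int) (d : PySem.Dict Int Int),
    done ++ todo = pts →
    d.keys = pts →
    (∀ x y, x ∈ pts → y ∈ pts →
      (d.getD x 0 = d.getD y 0 ↔ Relation.EqvGen (edgeRel pts θ done) x y)) →
    (todo.foldl (mergeStep θ pts) d).keys = pts ∧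
    (∀ x y, x ∈ pts → y ∈ pts →
      ((todo.foldl (mergeStep θ pts) d).getD x 0 = (todo.foldl (mergeStep θ pts) d).getD y 0 ↔
        Relation.EqvGen (edgeRel pts θ pts) x y)) := by
  intro todo
  induction todo with
  | nil =>
    intro done d hsplit hkeys hiff
    rw [List.append_nil] at hsplit
    subst hsplit
    exact ⟨hkeys, hiff⟩
  | cons p rest ih =>
    intro done d hsplit hkeys hiff
    have hp : p ∈ pts := by rw [← hsplit]; simp
    set q := PySem.Int.mod (p + θ) 360 with hqdef
    have hqs : q = sfun θ p := rfl
    have hcontains : d.contains q = true ↔ q ∈ pts := by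
      rw [PySem.Dict.contains_iff_mem_keys, hkeys]
    have hsplit' : (done ++ [p]) ++ rest = pts := by rw [List.append_assoc]; simpa using hsplit
    have hrel' : ∀ a b, edgeRel pts θ (done ++ [p]) a b ↔
        (edgeRel pts θ done a b ∨ (q ∈ pts ∧ a = p ∧ b = q)) := by
      intro a b
      unfold edgeRel
      constructor
      · rintro ⟨ha, hb, hab⟩
        rcases List.mem_append.mp ha with h | h
        · exact Or.inl ⟨h, hb, hab⟩
        · rw [List.mem_singleton] at h
          subst h
          exact Or.inr ⟨by rw [hqs, ← hab]; exact hb, rfl, by rw [hqs, hab]⟩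
      · rintro (⟨ha, hb, hab⟩ | ⟨hq, ha, hb⟩)
        · exact ⟨List.mem_append.mpr (Or.inl ha), hb, hab⟩
        · subst ha; subst hb
          exact ⟨List.mem_append.mpr (Or.inr (List.mem_singleton.mpr rfl)), hq, hqs⟩
    rw [List.foldl_cons]
    by_cases hq : q ∈ pts
    · -- edge (p, q) is added
      have hEpair : ∀ x y, Relation.EqvGen (edgeRel pts θ (done ++ [p])) x y ↔
          (Relation.EqvGen (edgeRel pts θ done) x y ∨
           (Relation.EqvGen (edgeRel pts θ done) x p ∧ Relation.EqvGen (edgeRel pts θ done) q y) ∨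
           (Relation.EqvGen (edgeRel pts θ done) x q ∧ Relation.EqvGen (edgeRel pts θ done) p y)) := by
        intro x y
        rw [eqvGen_congr _ (fun a b => edgeRel pts θ done a b ∨ (a = p ∧ b = q))
          (by intro a b; rw [hrel' a b]; tauto) x y]
        exact eqvGen_pair _ p q x y
      by_cases heq : d.getD p 0 = d.getD q 0
      · -- labels already equal: no relabel, the new edge is redundant
        have hstep : mergeStep θ pts d p = d := by
          unfold mergeStep
          rw [if_neg (by rw [← hqdef]; intro h; exact h.2 heq)]
        rw [hstep]
        apply ih (done ++ [p]) d hsplit' hkeys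
        intro x y hx hy
        rw [hiff x y hx hy, hEpair x y]
        have hEpq : Relation.EqvGen (edgeRel pts θ done) p q := (hiff p q hp hq).mp heq
        constructor
        · intro h; exact Or.inl h
        · rintro (h | ⟨h1, h2⟩ | ⟨h1, h2⟩)
          · exact h
          · exact Relation.EqvGen.trans _ _ _ (Relation.EqvGen.trans _ _ _ h1 hEpq) h2
          · exact Relation.EqvGen.trans _ _ _
              (Relation.EqvGen.trans _ _ _ h1 (Relation.EqvGen.symm _ _ hEpq)) h2
      · -- different labels: relabel the whole old class
        set old := d.getD p 0 with holddef
        set new := d.getD q 0 with hnewdef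
        have hstep : mergeStep θ pts d p = pts.foldl (relabelStep old new) d := by
          unfold mergeStep
          rw [if_pos ⟨hcontains.mpr hq, by rw [← hqdef, ← holddef, ← hnewdef]; exact heq⟩]
        rw [hstep]
        have hkeys' : (pts.foldl (relabelStep old new) d).keys = pts := by
          rw [relabel_keys old new pts d (by intro z hz; rw [hkeys]; exact hz), hkeys]
        have hget : ∀ x, x ∈ pts → (pts.foldl (relabelStep old new) d).getD x 0
            = if d.getD x 0 = old then new else d.getD x 0 := by
          intro x hx
          rw [relabel_getD old new pts d hnd x]
          by_cases h : d.getD x 0 = old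
          · simp [hx, h]
          · simp [h]
        apply ih (done ++ [p]) _ hsplit' hkeys'
        intro x y hx hy
        rw [hget x hx, hget y hy, hEpair x y]
        have hxo : d.getD x 0 = old ↔ Relation.EqvGen (edgeRel pts θ done) x p := hiff x p hx hp
        have hxn : d.getD x 0 = new ↔ Relation.EqvGen (edgeRel pts θ done) x q := hiff x q hx hq
        have hyo : d.getD y 0 = old ↔ Relation.EqvGen (edgeRel pts θ done) y p := hiff y p hy hp
        have hyn : d.getD y 0 = new ↔ Relation.EqvGen (edgeRel pts θ done) y q := hiff y q hy hq
        have hxy : d.getD x 0 = d.getD y 0 ↔ Relation.EqvGen (edgeRel pts θ done) x y :=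
          hiff x y hx hy
        by_cases hx1 : d.getD x 0 = old <;> by_cases hy1 : d.getD y 0 = old
        · rw [if_pos hx1, if_pos hy1]
          constructor
          · intro _
            exact Or.inl (Relation.EqvGen.trans _ _ _ (hxo.mp hx1)
              (Relation.EqvGen.symm _ _ (hyo.mp hy1)))
          · intro _; rfl
        · rw [if_pos hx1, if_neg hy1]
          constructor
          · intro h
            exact Or.inr (Or.inl ⟨hxo.mp hx1,
              Relation.EqvGen.symm _ _ (hyn.mp h.symm)⟩)
          · rintro (h | ⟨h1, h2⟩ | ⟨h1, h2⟩)
            · exact absurd (hyo.mpr (Relation.EqvGen.trans _ _ _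
                (Relation.EqvGen.symm _ _ h) (hxo.mp hx1))) hy1
            · exact (hyn.mpr (Relation.EqvGen.symm _ _ h2)).symm
            · exact absurd (hx1.symm.trans (hxn.mpr h1)) heq
        · rw [if_neg hx1, if_pos hy1]
          constructor
          · intro h
            exact Or.inr (Or.inr ⟨hxn.mp h, Relation.EqvGen.symm _ _ (hyo.mp hy1)⟩)
          · rintro (h | ⟨h1, h2⟩ | ⟨h1, h2⟩)
            · exact absurd (hxo.mpr (Relation.EqvGen.trans _ _ _ h (hyo.mp hy1))) hx1
            · exact absurd (hxo.mpr h1) hx1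
            · exact hxn.mpr h1
        · rw [if_neg hx1, if_neg hy1, hxy]
          constructor
          · intro h; exact Or.inl h
          · rintro (h | ⟨h1, h2⟩ | ⟨h1, h2⟩)
            · exact h
            · exact absurd (hxo.mpr h1) hx1
            · exact absurd (hyo.mpr (Relation.EqvGen.symm _ _ h2)) hy1
    · -- q not in the point set: no edge is added, the dict is unchanged
      have hstep : mergeStep θ pts d p = d := by
        unfold mergeStep
        rw [if_neg ?_]
        rintro ⟨hc, -⟩
        exact hq (hcontains.mp hc)
      rw [hstep]
      apply ih (done ++ [p]) d hsplit' hkeys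
      intro x y hx hy
      rw [hiff x y hx hy]
      refine eqvGen_congr (edgeRel pts θ done) (edgeRel pts θ (done ++ [p])) ?_ x y
      intro a b
      rw [hrel' a b]
      constructor
      · exact Or.inl
      · rintro (h | ⟨hc, -, -⟩)
        · exact h
        · exact absurd hc hq

-- ===== the per-theta equivalence of the two inner computations =====

lemma inner_eq (pt : List Int) (N θ : Int)
    (hrange : RangeOK pt) (hN : N ≤ (pt.length : Int)) (hθ0 : 0 ≤ θ) (hθ1 : θ < 360)
    (lab cnt : PySem.Dict Int Int)
    (hiff : ∀ x y, x ∈ PySem.Set.ofList pt → y ∈ PySem.Set.ofList pt →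
      (lab.getD x 0 = lab.getD y 0 ↔
        Relation.EqvGen (edgeRel (PySem.Set.ofList pt) θ (PySem.Set.ofList pt)) x y))
    (hcnt : ∀ L : Int, cnt.getD L 0
      = (((PySem.Set.ofList pt).filter (fun x => decide (lab.getD x 0 = L))).length : Int)) :
    ∀ (idx : List Int), (∀ k ∈ idx, 0 ≤ k ∧ k < N) →
    ∀ (VA seen : PySem.Set Int) (accA accB : Int),
    VA.Nodup → (∀ x ∈ VA, x ∈ PySem.Set.ofList pt) →
    (∀ x ∈ PySem.Set.ofList pt, x ∈ VA ↔ lab.getD x 0 ∈ seen) →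
    accA = accB →
    (idx.foldl (stepA N (PySem.Set.ofList pt) pt θ) (VA, accA)).2
      = (idx.foldl (tallyStep lab cnt pt) (seen, accB)).2 := by
  set pts : PySem.Set Int := PySem.Set.ofList pt with hptsdef
  have hpts_nd : pts.Nodup := PySem.Set.nodup_ofList pt
  have hpts_range : RangeOK pts := by
    intro x hx
    exact hrange x ((PySem.Set.mem_ofList _ _).mp hx)
  intro idx
  induction idx with
  | nil => intro _ VA seen accA accB _ _ _ hacc; simpa using hacc
  | cons k idx ih =>
    intro hk VA seen accA accB hVAnd hVAsub hlink hacc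
    have hkb := hk k (List.mem_cons_self)
    have hklen : k < (pt.length : Int) := lt_of_lt_of_le hkb.2 hN
    have hp_get : PySem.List.pyGetD pt k 0 = pt[k.toNat] :=
      PySem.List.pyGetD_eq_getElem (xs := pt) (i := k) (d := 0) hkb.1 (by simpa using hklen)
    set p : Int := PySem.List.pyGetD pt k 0 with hpdef
    have hp_mem_pt : p ∈ pt := by rw [hp_get]; exact List.getElem_mem _
    have hp_pts : p ∈ pts := (PySem.Set.mem_ofList _ _).mpr hp_mem_pt
    have hp_range : 0 ≤ p ∧ p < 360 := hrange p hp_mem_pt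
    set L : Int := lab.getD p 0 with hLdef
    rw [List.foldl_cons, List.foldl_cons]
    by_cases hmem : p ∈ VA
    · have hmemL : L ∈ seen := (hlink p hp_pts).mp hmem
      have hA : stepA N pts pt θ (VA, accA) k = (VA, accA) := by
        simp only [stepA, ← hpdef]
        rw [if_neg (by simpa using hmem)]
      have hB : tallyStep lab cnt pt (seen, accB) k = (seen, accB) := by
        simp only [tallyStep, ← hpdef, ← hLdef]
        rw [if_pos (by simpa using hmemL)]
      rw [hA, hB]
      exact ih (fun j hj => hk j (List.mem_cons_of_mem _ hj)) VA seen accA accB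
        hVAnd hVAsub hlink hacc
    · have hmemL : L ∉ seen := fun h => hmem ((hlink p hp_pts).mpr h)
      set K : List Int := pts.filter (fun x => decide (lab.getD x 0 = L)) with hKdef
      have hKchar : ∀ x, x ∈ K ↔ (x ∈ pts ∧ lab.getD x 0 = L) := by
        intro x
        rw [hKdef, List.mem_filter]
        simp
      have hKnd : K.Nodup := List.Nodup.filter _ hpts_nd
      have hpK : p ∈ K := (hKchar p).mpr ⟨hp_pts, rfl⟩
      have hKsub : ∀ x ∈ K, x ∈ pts := fun x hx => ((hKchar x).mp hx).1
      have hKrange : ∀ x ∈ K, 0 ≤ x ∧ x < 360 := fun x hx => hpts_range x (hKsub x hx)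
      have hKcl : ∀ x ∈ K, (sfun θ x ∈ pts → sfun θ x ∈ K) ∧
          (sfun (-θ) x ∈ pts → sfun (-θ) x ∈ K) := by
        intro x hx
        obtain ⟨hxp, hxl⟩ := (hKchar x).mp hx
        constructor
        · intro hs
          have hedge : Relation.EqvGen (edgeRel pts θ pts) x (sfun θ x) :=
            Relation.EqvGen.rel _ _ ⟨hxp, hs, rfl⟩
          have := (hiff x (sfun θ x) hxp hs).mpr hedge
          exact (hKchar _).mpr ⟨hs, by rw [← this, hxl]⟩
        · intro hs
          have hinv : sfun θ (sfun (-θ) x) = x :=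
            sfun_inv' θ x (hpts_range x hxp).1 (hpts_range x hxp).2
          have hedge : Relation.EqvGen (edgeRel pts θ pts) (sfun (-θ) x) x :=
            Relation.EqvGen.rel _ _ ⟨hs, hxp, hinv.symm⟩
          have := (hiff (sfun (-θ) x) x hs hxp).mpr hedge
          exact (hKchar _).mpr ⟨hs, by rw [this, hxl]⟩
      have hKmin : ∀ vis : List Int, p ∈ vis →
          (∀ x ∈ K, x ∈ vis → (sfun θ x ∈ pts → sfun θ x ∈ vis) ∧
            (sfun (-θ) x ∈ pts → sfun (-θ) x ∈ vis)) →
          ∀ x ∈ K, x ∈ vis := by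
        intro vis hpvis hclv x hxK
        have hE : Relation.EqvGen (edgeRel pts θ pts) p x :=
          (hiff p x hp_pts (hKsub x hxK)).mp (((hKchar x).mp hxK).2).symm
        have hC : ∀ a b, Relation.EqvGen (edgeRel pts θ pts) a b →
            ((a ∈ K ∧ a ∈ vis) ↔ (b ∈ K ∧ b ∈ vis)) := by
          intro a b hab
          induction hab with
          | rel a b hr =>
            obtain ⟨hap, hbp, hba⟩ := hr
            constructor
            · rintro ⟨haK, hav⟩
              have hbK : b ∈ K := by
                rw [hba]
                exact (hKcl a haK).1 (hba ▸ hbp)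
              exact ⟨hbK, hba ▸ (hclv a haK hav).1 (hba ▸ hbp)⟩
            · rintro ⟨hbK, hbv⟩
              have hab' : sfun (-θ) b = a := by
                rw [hba]
                exact sfun_inv θ a (hpts_range a hap).1 (hpts_range a hap).2
              have haK : a ∈ K := by
                rw [← hab']
                exact (hKcl b hbK).2 (hab' ▸ hap)
              exact ⟨haK, hab' ▸ (hclv b hbK hbv).2 (hab' ▸ hap)⟩
          | refl a => exact Iff.rfl
          | symm a b _ ih => exact ih.symm
          | trans a b c _ _ ih1 ih2 => exact ih1.trans ih2
        exact ((hC p x hE).mp ⟨hpK, hpvis⟩).2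
      have hdisjK : ∀ x ∈ K, x ∉ VA := by
        intro x hxK hxVA
        have := (hlink x (hKsub x hxK)).mp hxVA
        rw [((hKchar x).mp hxK).2] at this
        exact hmemL this
      have haddA : PySem.Set.add VA p = VA ++ [p] := PySem.Set.add_of_not_mem hmem
      have hKlen : K.length ≤ pt.length := by
        have h1 : K.Subperm pts := List.Nodup.subperm hKnd hKsub
        have h2 := h1.length_le
        have h3 := PySem.Set.length_ofList_le (xs := pt)
        rw [hptsdef] at h2
        omega
      have hbfs := bfsLoop_inv pts θ hpts_range hθ0 hθ1 K VA p hKnd hVAnd hKsub hKcl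
        hKmin hdisjK hpK (pt.length + 1) [p] (PySem.Set.add VA p) 0
        (List.nodup_singleton p)
        (by
          intro x hx
          rw [List.mem_singleton] at hx
          subst hx
          exact ⟨by rw [haddA]; simp, hpK⟩)
        (by
          rw [haddA, List.nodup_append]
          refine ⟨hVAnd, List.nodup_singleton p, ?_⟩
          intro a ha b hb h
          rw [List.mem_singleton] at hb
          exact hmem ((h.trans hb) ▸ ha))
        (by
          intro x hx
          rw [haddA] at hx
          rcases List.mem_append.mp hx with h | h
          · exact Or.inl h
          · rw [List.mem_singleton] at h
            exact Or.inr (h ▸ hpK))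
        (by intro x hx; rw [haddA]; exact List.mem_append.mpr (Or.inl hx))
        (by rw [haddA]; simp)
        (by
          intro x hx hxV hxq
          rw [haddA] at hx
          rcases List.mem_append.mp hx with h | h
          · exact absurd h hxV
          · rw [List.mem_singleton] at h
            exact absurd (by rw [h]; exact List.mem_singleton.mpr rfl) hxq)
        (by
          rw [haddA]
          simp only [List.length_append, List.length_singleton]
          push_cast
          ring)
        (by
          have hmiss : (K.filter (fun z => decide (z ∉ PySem.Set.add VA p))).length
              < K.length := by
            apply List.length_filter_lt_length_iff_exists.mpr
            refine ⟨p, hpK, ?_⟩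
            simp [haddA]
          simp only [List.length_singleton]
          omega)
      obtain ⟨hres1, hres2, hres3⟩ := hbfs
      have hA : stepA N pts pt θ (VA, accA) k
          = ((bfsLoop pts θ (pt.length + 1) [p] (PySem.Set.add VA p) 0).2,
             accA + PySem.Int.floordiv
               ((bfsLoop pts θ (pt.length + 1) [p] (PySem.Set.add VA p) 0).1 + 1) 2 * 2) := by
        simp only [stepA, ← hpdef, BFS]
        rw [if_pos (by simpa using hmem)]
      have hB : tallyStep lab cnt pt (seen, accB) k
          = (PySem.Set.add seen L, accB + PySem.Int.floordiv (cnt.getD L 0) 2 * 2) := by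
        simp only [tallyStep, ← hpdef, ← hLdef]
        rw [if_neg (by simpa using hmemL)]
      rw [hA, hB, hres1]
      have hcntL : cnt.getD L 0 = (K.length : Int) := by rw [hcnt L, hKdef]
      have hacc' : accA + PySem.Int.floordiv ((K.length : Int) - 1 + 1) 2 * 2
          = accB + PySem.Int.floordiv (cnt.getD L 0) 2 * 2 := by
        rw [hacc, hcntL]
        congr 2
        ring_nf
      apply ih (fun j hj => hk j (List.mem_cons_of_mem _ hj))
      · exact hres3
      · intro x hx
        rcases (hres2 x).mp hx with h | h
        · exact hVAsub x h
        · exact hKsub x h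
      · intro x hx
        rw [hres2 x, PySem.Set.mem_add]
        constructor
        · rintro (h | h)
          · exact Or.inl ((hlink x hx).mp h)
          · exact Or.inr ((hKchar x).mp h).2
        · rintro (h | h)
          · exact Or.inl ((hlink x hx).mpr h)
          · exact Or.inr ((hKchar x).mpr ⟨hx, h⟩)
      · exact hacc'

lemma gapA_fold_eq (l : List Int) (r : Int → List Int) (dd : Int → Int → Int)
    (gA : Int → Int) (b : Int) :
    (l.foldl (fun g i => (r i).foldl (fun g2 j => g2 ++ [dd i j]) g) ([] : List Int)).foldl
      (fun res θ => max res (gA θ)) b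
    = l.foldl (fun res i => (r i).foldl (fun res2 j => max res2 (gA (dd i j))) res) b := by
  have hflat : ∀ G : List Int,
      l.foldl (fun g i => (r i).foldl (fun g2 j => g2 ++ [dd i j]) g) G
        = G ++ l.flatMap (fun i => (r i).map (dd i)) := by
    induction l with
    | nil => intro G; simp
    | cons i l ihl =>
      intro G
      rw [List.foldl_cons, ihl, PySem.List.foldl_append_singleton_eq_map,
        List.flatMap_cons, List.append_assoc]
  rw [hflat, List.nil_append]
  clear hflat
  induction l generalizing b with
  | nil => simp
  | cons i l ihl =>
    rw [List.flatMap_cons, List.foldl_append, List.foldl_cons, List.foldl_map]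
    exact ihl _

lemma nested_congr (l : List Int) (r : Int → List Int) (FA FB : Int → Int → Int)
    (h : ∀ i ∈ l, ∀ j ∈ r i, FA i j = FB i j) (b : Int) :
    l.foldl (fun res i => (r i).foldl (fun res2 j => max res2 (FA i j)) res) b
    = l.foldl (fun res i => (r i).foldl (fun res2 j => max res2 (FB i j)) res) b := by
  apply PySem.List.foldl_congr_mem
  intro acc i hi
  apply PySem.List.foldl_congr_mem
  intro acc2 j hj
  rw [h i hi j hj]

-- properties of the label map built per theta
lemma buildLabel_spec (θ : Int) (pt : List Int) :
    (buildLabel θ pt).keys = PySem.Set.ofList pt ∧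
    (∀ x y, x ∈ PySem.Set.ofList pt → y ∈ PySem.Set.ofList pt →
      ((buildLabel θ pt).getD x 0 = (buildLabel θ pt).getD y 0 ↔
        Relation.EqvGen (edgeRel (PySem.Set.ofList pt) θ (PySem.Set.ofList pt)) x y)) := by
  set pts : PySem.Set Int := PySem.Set.ofList pt with hptsdef
  have hnd : pts.Nodup := PySem.Set.nodup_ofList pt
  set lab0 : PySem.Dict Int Int := pt.foldl (fun d p => d.insert p p) PySem.Dict.empty
    with hlab0
  have hkeys0 : lab0.keys = pts := by
    rw [hlab0, PySem.Dict.keys_foldl_insert]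
    rw [PySem.Dict.keys_empty, hptsdef, PySem.Set.ofList_eq_foldl]
    rfl
  have hget0 : ∀ x, x ∈ pts → lab0.getD x 0 = x := by
    intro x hx
    rw [hlab0, getD_init]
    rw [if_pos ((PySem.Set.mem_ofList _ _).mp (hptsdef ▸ hx))]
  have hiff0 : ∀ x y, x ∈ pts → y ∈ pts →
      (lab0.getD x 0 = lab0.getD y 0 ↔ Relation.EqvGen (edgeRel pts θ []) x y) := by
    intro x y hx hy
    rw [hget0 x hx, hget0 y hy]
    rw [eqvGen_congr (edgeRel pts θ []) (fun _ _ => False)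
      (by intro a b; unfold edgeRel; simp) x y, eqvGen_bot]
  have hbl : buildLabel θ pt = lab0.keys.foldl (mergeStep θ lab0.keys) lab0 := rfl
  rw [hbl, hkeys0]
  exact merge_inv θ pts hnd pts [] lab0 (by simp) hkeys0 hiff0

-- the Counter of the label values counts each label's class size
lemma counter_values_spec (lab : PySem.Dict Int Int) (pt : List Int)
    (hkeys : lab.keys = PySem.Set.ofList pt) (L : Int) :
    (PySem.Dict.counter lab.values).getD L 0
      = (((PySem.Set.ofList pt).filter (fun x => decide (lab.getD x 0 = L))).length : Int) := by
  have hnd : lab.keys.Nodup := by rw [hkeys]; exact PySem.Set.nodup_ofList pt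
  rw [PySem.Dict.getD_counter]
  rw [PySem.Dict.values_eq_map_keys lab hnd 0, hkeys]
  rw [List.count_eq_countP, List.countP_map]
  rw [List.countP_eq_length_filter]
  congr 1

theorem solve_spec : Claim_equal_solve := by
  intro N point hdom hpre
  unfold Spec_solve
  by_cases hN1 : N = 1
  · simp [solve, solve_alt, hN1]
  · have hbeq : ¬ ((N == 1) = true) := by simp [hN1]
    by_cases hNle : N ≤ 1
    · have hnil : PySem.List.pyRange 0 (N - 1) 1 = [] :=
        PySem.List.pyRange_one_eq_nil (by omega)
      simp only [solve, solve_alt]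
      rw [if_neg hbeq, if_neg hbeq, hnil]
      simp
    · have hptr : ∀ p ∈ point, 0 ≤ p ∧ p < 360 := hpre.2.resolve_left hNle
      simp only [solve, solve_alt]
      rw [if_neg hbeq, if_neg hbeq]
      set pt : List Int := PySem.List.sorted point (fun x => x) false with hpt
      have hrange : RangeOK pt := by
        intro x hx
        refine hptr x ?_
        rw [hpt, PySem.List.mem_sorted (key := fun z : Int => z)] at hx
        exact hx
      have hlen : pt.length = point.length := by
        rw [hpt]
        exact PySem.List.length_sorted point (fun z : Int => z) false
      have hN : N ≤ (pt.length : Int) := by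
        rw [hlen]
        exact hpre.1
      have hpair : pt.Pairwise (fun a b => a ≤ b) := by
        rw [hpt]
        exact PySem.List.sorted_pairwise point (fun z => z)
      rw [gapA_fold_eq (l := PySem.List.pyRange 0 (N - 1) 1)
        (r := fun i => PySem.List.pyRange (i + 1) N 1)
        (dd := fun i j => PySem.List.pyGetD pt j 0 - PySem.List.pyGetD pt i 0)
        (gA := fun θ => ((PySem.List.pyRange 0 N 1).foldl
          (stepA N (PySem.Set.ofList pt) pt θ) (PySem.Set.empty, 0)).2)]
      apply nested_congr
      intro i hi j hj
      rw [PySem.List.mem_pyRange_one] at hi hj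
      have hjlt : j < (pt.length : Int) := lt_of_lt_of_le hj.2 hN
      have hilt : i < (pt.length : Int) := by omega
      have hjget : PySem.List.pyGetD pt j 0 = pt[j.toNat] :=
        PySem.List.pyGetD_eq_getElem (xs := pt) (i := j) (d := 0) (by omega) (by simpa using hjlt)
      have higet : PySem.List.pyGetD pt i 0 = pt[i.toNat] :=
        PySem.List.pyGetD_eq_getElem (xs := pt) (i := i) (d := 0) hi.1 (by simpa using hilt)
      have hjn : j.toNat < pt.length := by omega
      have hin : i.toNat < pt.length := by omega
      have hij : pt[i.toNat] ≤ pt[j.toNat] := by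
        refine (List.pairwise_iff_getElem.mp hpair) i.toNat j.toNat hin hjn (by omega)
      have hir := hrange pt[i.toNat] (List.getElem_mem _)
      have hjr := hrange pt[j.toNat] (List.getElem_mem _)
      have hθ0 : 0 ≤ PySem.List.pyGetD pt j 0 - PySem.List.pyGetD pt i 0 := by
        rw [hjget, higet]
        omega
      have hθ1 : PySem.List.pyGetD pt j 0 - PySem.List.pyGetD pt i 0 < 360 := by
        rw [hjget, higet]
        omega
      set θ : Int := PySem.List.pyGetD pt j 0 - PySem.List.pyGetD pt i 0 with hθdef
      obtain ⟨hkeys, hiff⟩ := buildLabel_spec θ pt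
      exact inner_eq pt N θ hrange hN hθ0 hθ1 (buildLabel θ pt)
        (PySem.Dict.counter (buildLabel θ pt).values) hiff
        (counter_values_spec _ pt hkeys)
        (PySem.List.pyRange 0 N 1)
        (fun k hk => by rw [PySem.List.mem_pyRange_one] at hk; exact hk)
        PySem.Set.empty PySem.Set.empty 0 0 List.nodup_nil
        (fun x hx => absurd hx (List.not_mem_nil))
        (fun x _ => by simp) rfl
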